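-- pv_equiv track=rewrite | github.com/amensal/blenderAddons_toBeRemoved | vtools_rigSystem/curveTools.py | getFCurveTargetBone
-- ===== SOURCE A (Python) =====
-- def getFCurveTargetBone(pDataPath):
--
--     boneName = ""
--     copy = False
--
--     for c in pDataPath:
--         if copy == True and c != "]":
--             boneName += c
--
--         if c == "[":
--             copy = True
--         elif c == "]":
--             copy = False
--             break
--
--     boneName = boneName.replace('"', '')
--     return boneName
-- ===== SOURCE B (Python) =====
-- def getFCurveTargetBone(pDataPath):
--     start = pDataPath.find('[')
--     if start == -1:
--         return ""
--     end = pDataPath.find(']')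
--     if end != -1 and end < start:
--         return ""
--     sub = pDataPath[start + 1:] if end == -1 else pDataPath[start + 1:end]
--     return sub.replace('"', '')
-- ===== Notes on version B (the rewrite author's own statement) =====
-- stated objective: simpler
-- what changed: Replaces A's stateful character-by-character scan with a copy flag and break by computing the first index of the opening and the closing bracket with str.find and returning one slice (plus the quote strip).
import Mathlib
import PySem

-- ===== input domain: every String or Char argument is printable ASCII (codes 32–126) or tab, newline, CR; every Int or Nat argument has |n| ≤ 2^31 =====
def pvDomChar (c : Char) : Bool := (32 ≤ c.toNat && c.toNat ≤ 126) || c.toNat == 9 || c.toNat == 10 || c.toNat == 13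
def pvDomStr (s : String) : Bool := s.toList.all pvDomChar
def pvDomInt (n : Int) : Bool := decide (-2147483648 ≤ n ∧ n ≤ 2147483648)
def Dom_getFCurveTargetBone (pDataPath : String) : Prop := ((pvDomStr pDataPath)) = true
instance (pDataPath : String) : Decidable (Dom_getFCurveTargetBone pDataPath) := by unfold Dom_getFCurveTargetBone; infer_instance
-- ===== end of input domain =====

-- B replaces A's stateful char-by-char copy-flag scan with find('[')/find(']') index search and one slice (objective: simpler; a timing run measured B faster by a constant factor: C-level find/slice vs a Python-level loop).

-- ===== PORT A =====
-- the 'for c in pDataPath' loop with the copy flag and the 'break' at ']'; emits the chars boneName collects, in order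
def pvLoopA : List Char → Bool → List Char
  | [], _ => []
  | c :: rest, copy =>
    let emit := if copy && !(c == ']') then [c] else []   -- 'if copy == True and c != "]": boneName += c'
    if c == '[' then emit ++ pvLoopA rest true            -- 'if c == "[": copy = True'
    else if c == ']' then emit                            -- 'elif c == "]": copy = False; break'
    else emit ++ pvLoopA rest copy

def getFCurveTargetBone (pDataPath : String) : String :=
  String.ofList (PySem.Chars.replace (pvLoopA pDataPath.toList false) ['"'] [])  -- boneName.replace('"','')

-- ===== PORT B =====
def getFCurveTargetBone_alt (pDataPath : String) : String :=
  let cs := pDataPath.toList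
  let start := PySem.Chars.find cs ['[']                  -- pDataPath.find('[')
  if start = -1 then ""
  else
    let stop := PySem.Chars.find cs [']']                 -- pDataPath.find(']')
    if stop ≠ -1 ∧ stop < start then ""
    else
      let sub := if stop = -1 then PySem.List.slice cs (some (start + 1)) none   -- pDataPath[start+1:]
                 else PySem.List.slice cs (some (start + 1)) (some stop)         -- pDataPath[start+1:end]
      String.ofList (PySem.Chars.replace sub ['"'] [])    -- sub.replace('"','')

-- ===== PRECONDITION & SPEC =====
def Spec_getFCurveTargetBone (pDataPath : String) (out : String) : Prop := out = getFCurveTargetBone_alt pDataPath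
instance (pDataPath : String) (out : String) : Decidable (Spec_getFCurveTargetBone pDataPath out) := by unfold Spec_getFCurveTargetBone; infer_instance

-- ===== CLAIM (what is proved, stated in full; the proofs are below) =====
def Claim_equal_getFCurveTargetBone : Prop := ∀ (pDataPath : String), Dom_getFCurveTargetBone pDataPath → Spec_getFCurveTargetBone pDataPath (getFCurveTargetBone pDataPath)

-- ===== LEMMAS AND PROOFS =====

theorem pv_singleton_prefix_iff (x : Char) (l : List Char) : [x] <+: l ↔ l.head? = some x := by
  cases l <;> simp [List.prefix_cons_iff, eq_comm]

-- Chars.find of a one-character pattern is List.idxOf?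
theorem pv_find_singleton (cs : List Char) (x : Char) :
    PySem.Chars.find cs [x] = match cs.idxOf? x with | none => -1 | some i => (i : Int) := by
  by_cases hm : x ∈ cs
  · have h0 : 0 ≤ PySem.Chars.find cs [x] := by
      rw [PySem.Chars.find_nonneg_iff, List.singleton_infix_iff]; exact hm
    obtain ⟨hpre, hmin⟩ := PySem.Chars.find_spec h0
    rw [pv_singleton_prefix_iff, List.head?_drop] at hpre
    have hidx : cs.idxOf? x = some (PySem.Chars.find cs [x]).toNat := by
      rw [List.idxOf?_eq_some_iff]
      have hlt : (PySem.Chars.find cs [x]).toNat < cs.length := by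
        by_contra hge
        rw [List.getElem?_eq_none (by omega)] at hpre; simp at hpre
      refine ⟨hlt, by simpa [List.getElem?_eq_getElem hlt] using hpre, ?_⟩
      intro j hj hja
      have := hmin j hj
      rw [pv_singleton_prefix_iff, List.head?_drop] at this
      exact this (by simp [List.getElem?_eq_getElem (by omega : j < cs.length), hja])
    rw [hidx]
    simp [Int.toNat_of_nonneg h0]
  · have : PySem.Chars.find cs [x] = -1 := by
      rw [PySem.Chars.find_eq_neg_one_iff, List.singleton_infix_iff]; exact hm
    rw [this, List.idxOf?_eq_none_iff.2 hm]

-- with copy already true, A's loop copies everything up to the first ']'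
theorem pv_loopA_true (cs : List Char) : pvLoopA cs true = cs.takeWhile (fun c => !(c == ']')) := by
  induction cs with
  | nil => rfl
  | cons c rest ih =>
    by_cases h : c = ']' <;> simp [pvLoopA, h, ih]

theorem pv_takeWhile_idx_none (x : Char) (l : List Char) (h : l.idxOf? x = none) :
    l.takeWhile (fun c => !(c == x)) = l := by
  rw [List.idxOf?_eq_none_iff] at h
  induction l with
  | nil => rfl
  | cons c rest ih =>
    simp at h
    have hc : (c == x) = false := by simp; exact fun e => h.1 e.symm
    simp [hc, ih h.2]

theorem pv_takeWhile_idx_some (x : Char) (l : List Char) (e : Nat) (h : l.idxOf? x = some e) :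
    l.takeWhile (fun c => !(c == x)) = l.take e := by
  induction l generalizing e with
  | nil => simp [List.idxOf?] at h
  | cons c rest ih =>
    rw [List.idxOf?_cons] at h
    by_cases hc : c = x
    · simp [hc] at h; simp [hc, ← h]
    · simp [hc] at h
      rcases h with ⟨e', he', rfl⟩
      simp [hc, ih e' he']

-- A's scan equals B's index/slice extraction, stated through idxOf?
theorem pv_key (cs : List Char) :
    pvLoopA cs false =
      (match cs.idxOf? '[' with
       | none => []
       | some i =>
         match cs.idxOf? ']' with
         | none => cs.drop (i+1)
         | some e => if e < i then [] else (cs.drop (i+1)).take (e - (i+1))) := by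
  induction cs with
  | nil => rfl
  | cons c rest ih =>
    by_cases h1 : c = '['
    · subst h1
      rw [show pvLoopA ('[' :: rest) false = pvLoopA rest true from by simp [pvLoopA]]
      rw [pv_loopA_true]
      rcases he : rest.idxOf? ']' with _ | e
      · simp [List.idxOf?_cons, he, pv_takeWhile_idx_none ']' rest he]
      · simp [List.idxOf?_cons, he, pv_takeWhile_idx_some ']' rest e he]
    · by_cases h2 : c = ']'
      · subst h2
        rw [show pvLoopA (']' :: rest) false = [] from by simp [pvLoopA]]
        rcases hi : rest.idxOf? '[' with _ | i
        · simp [List.idxOf?_cons, hi]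
        · simp [List.idxOf?_cons, hi]
      · rw [show pvLoopA (c :: rest) false = pvLoopA rest false from by simp [pvLoopA, h1, h2]]
        rw [ih]
        rcases hi : rest.idxOf? '[' with _ | i
        · simp [List.idxOf?_cons, hi, h1]
        · rcases he : rest.idxOf? ']' with _ | e
          · simp [List.idxOf?_cons, hi, he, h1, h2]
          · simp only [List.idxOf?_cons, hi, he, beq_iff_eq]
            have hc1 : (c = '[') = False := by simp [h1]
            have hc2 : (c = ']') = False := by simp [h2]
            simp [hc1, hc2]

theorem pv_replace_nil : PySem.Chars.replace [] ['"'] [] = [] := by decide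

-- ===== VERDICT (by name: the statement is the Claim_ definition above) =====
theorem getFCurveTargetBone_spec : Claim_equal_getFCurveTargetBone := by
  intro s _
  show getFCurveTargetBone s = getFCurveTargetBone_alt s
  unfold getFCurveTargetBone getFCurveTargetBone_alt
  dsimp only
  rw [pv_key s.toList, pv_find_singleton s.toList '[', pv_find_singleton s.toList ']']
  rcases hi : s.toList.idxOf? '[' with _ | i
  · simp [pv_replace_nil]
  · rcases he : s.toList.idxOf? ']' with _ | e
    · dsimp only
      rw [if_neg (by omega : ¬((i : Int) = -1))]
      rw [if_neg (by simp : ¬((-1 : Int) ≠ -1 ∧ (-1 : Int) < (i : Int)))]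
      rw [if_pos rfl]
      rw [show (i : Int) + 1 = ((i + 1 : Nat) : Int) by push_cast; ring,
          PySem.List.slice_from_natCast]
    · by_cases hlt : e < i
      · dsimp only
        rw [if_pos hlt, if_neg (by omega : ¬((i : Int) = -1)),
            if_pos (⟨by omega, by exact_mod_cast hlt⟩ : (e : Int) ≠ -1 ∧ (e : Int) < (i : Int))]
        simp [pv_replace_nil]
      · dsimp only
        rw [if_neg hlt, if_neg (by omega : ¬((i : Int) = -1)),
            if_neg (by rintro ⟨-, hh⟩; omega : ¬((e : Int) ≠ -1 ∧ (e : Int) < (i : Int))),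
            if_neg (by omega : ¬((e : Int) = -1))]
        rw [show (i : Int) + 1 = ((i + 1 : Nat) : Int) by push_cast; ring,
            PySem.List.slice_natCast]
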